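-- pv_equiv track=rewrite | github.com/KolbeWilliams/Machine-Learning | Homeworks/HW8/Exercise1.py | minNotRepeated
-- ===== SOURCE A (Python) =====
-- def minNotRepeated(li):
--     minimum = min(li)
--     count = li.count(minimum)
--     if count > 1:
--         li = [num for num in li if num != minimum]
--         return minNotRepeated(li)
--     else:
--         return minimum
-- ===== SOURCE B (Python) =====
-- def minNotRepeated(li):
--     s = sorted(li)
--     i, n = 0, len(s)
--     while i < n:
--         j = i + 1
--         while j < n and s[j] == s[i]:
--             j += 1
--         if j == i + 1:
--             return s[i]
--         i = j
--     raise ValueError("min() iterable argument is empty")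
-- ===== Notes on version B (the rewrite author's own statement) =====
-- stated objective: alternative
-- what changed: Replaces A's repeated min/count/filter recursion (worst-case quadratic) with one sort followed by a single run-length scan that returns the first singleton run.
import Mathlib
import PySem

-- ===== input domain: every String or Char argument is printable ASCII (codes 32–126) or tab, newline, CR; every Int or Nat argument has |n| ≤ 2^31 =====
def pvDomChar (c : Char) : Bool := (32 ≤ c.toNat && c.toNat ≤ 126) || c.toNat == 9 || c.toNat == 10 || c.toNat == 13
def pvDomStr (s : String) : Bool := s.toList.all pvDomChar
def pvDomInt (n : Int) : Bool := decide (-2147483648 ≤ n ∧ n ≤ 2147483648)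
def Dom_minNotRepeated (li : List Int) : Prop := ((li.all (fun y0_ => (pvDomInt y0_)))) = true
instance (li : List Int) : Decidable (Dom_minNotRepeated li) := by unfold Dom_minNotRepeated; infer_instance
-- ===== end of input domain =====

-- B replaces A's repeated min/count/filter recursion by one sort plus a single run-length scan
-- returning the first singleton run (a different algorithm of comparable cost).

-- ===== PORT A =====
-- termination helper for port A: filtering out the minimum (which is a member) shortens the list
theorem filterNe_length_lt (li : List Int) (m : Int) (hm : m ∈ li) :
    (li.filter (fun num => !decide (num = m))).length < li.length := by
  induction li with
  | nil => cases hm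
  | cons a t ih =>
    simp only [List.filter_cons]
    by_cases ha : a = m
    · subst ha
      have := List.length_filter_le (fun num => !decide (num = a)) t
      simp; omega
    · rcases List.mem_cons.mp hm with h | h
      · exact absurd h.symm ha
      · have := ih h
        simp [ha]; omega

-- literal port of A: minimum = min(li); count = li.count(minimum); filter-and-recurse if count > 1.
-- min([]) raises ValueError in Python (the all-values-repeated inputs, outside Pre_); the port returns 0 there.
def minNotRepeated (li : List Int) : Int :=
  match h : PySem.List.min? li (fun x => x) with
  | none => 0
  | some minimum =>
    let count := PySem.List.count li minimum
    if count > 1 then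
      minNotRepeated (li.filter (fun num => decide (num ≠ minimum)))
    else minimum
termination_by li.length
decreasing_by
  have h2 := filterNe_length_lt li minimum (PySem.List.min?_mem h)
  simp only [List.length_unattach, ne_eq, decide_not,
    List.countP_eq_length_filter.symm] at h2 ⊢
  exact (List.countP_attach (l := li) (p := fun num => !decide (num = minimum))) ▸ h2

-- ===== PORT B =====
-- the scan loop of Source B: skip the maximal run equal to the head; return the head if its run has length 1
def runScan (s : List Int) : Int :=
  match s with
  | [] => 0            -- loop exhausted: Python B raises ValueError here (outside Pre_)
  | [x] => x
  | x :: y :: rest =>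
      if x = y then runScan ((y :: rest).dropWhile (fun z => z == x))
      else x
termination_by s.length
decreasing_by
  have := List.length_dropWhile_le (p := fun z => z == x) (y :: rest)
  simp at this ⊢; omega

def minNotRepeated_alt (li : List Int) : Int :=
  runScan (PySem.List.sorted li (fun x => x))

-- ===== PRECONDITION & SPEC =====
-- Pre_ excludes exactly the inputs on which Python A raises ValueError (no value occurs exactly
-- once, so the recursion eventually calls min on nothing); Python B raises ValueError there too.
def Pre_minNotRepeated (li : List Int) : Prop := ∃ x ∈ li, li.count x = 1
instance (li : List Int) : Decidable (Pre_minNotRepeated li) := by unfold Pre_minNotRepeated; infer_instance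
def pvWitness_minNotRepeated : List Int := [2, 2, 1, 3, 3]

def Spec_minNotRepeated (li : List Int) (out : Int) : Prop := out = minNotRepeated_alt li
instance (li : List Int) (out : Int) : Decidable (Spec_minNotRepeated li out) := by unfold Spec_minNotRepeated; infer_instance

-- ===== CLAIM (what is proved, stated in full; the proofs are below) =====
def Claim_equal_minNotRepeated : Prop := ∀ (li : List Int), Dom_minNotRepeated li → Pre_minNotRepeated li → Spec_minNotRepeated li (minNotRepeated li)

-- ===== LEMMAS AND PROOFS =====

-- the canonical characterisation both ports are proved to satisfy:
-- v is the smallest value occurring exactly once in li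
def IsMinUniq (li : List Int) (v : Int) : Prop :=
  v ∈ li ∧ li.count v = 1 ∧ ∀ y ∈ li, li.count y = 1 → v ≤ y

theorem isMinUniq_unique {li : List Int} {v w : Int}
    (hv : IsMinUniq li v) (hw : IsMinUniq li w) : v = w :=
  le_antisymm (hv.2.2 w hw.1 hw.2.1) (hw.2.2 v hv.1 hv.2.1)

theorem minNotRepeated_isMinUniq (li : List Int) (hpre : ∃ x ∈ li, li.count x = 1) :
    IsMinUniq li (minNotRepeated li) := by
  induction hn : li.length using Nat.strong_induction_on generalizing li with
  | _ n ih =>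
  subst hn
  rw [minNotRepeated.eq_def]
  cases hmin : PySem.List.min? li (fun x => x) with
  | none =>
    rw [PySem.List.min?_eq_none_iff] at hmin
    obtain ⟨x, hx, _⟩ := hpre; subst hmin; cases hx
  | some m =>
    have hmmem : m ∈ li := PySem.List.min?_mem hmin
    have hmin' : ∀ y ∈ li, m ≤ y := fun y hy => PySem.List.min?_isMin hmin y hy
    have hcq : PySem.List.count li m = li.count m := PySem.List.count_eq ..
    show IsMinUniq li (if PySem.List.count li m > 1 then
      minNotRepeated (li.filter (fun num => decide (num ≠ m))) else m)
    by_cases hc : PySem.List.count li m > 1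
    · rw [if_pos hc]
      set li' := li.filter (fun num => decide (num ≠ m)) with hli'
      have hcnt : ∀ z, z ≠ m → li'.count z = li.count z := by
        intro z hz
        apply List.count_filter
        simp [hz]
      obtain ⟨x, hx, hcx⟩ := hpre
      have hxm : x ≠ m := by intro rfl; omega
      have hcx' : li'.count x = 1 := by rw [hcnt x hxm]; exact hcx
      have hx' : x ∈ li' := List.count_pos_iff.mp (by omega)
      have hlen : li'.length < li.length := by
        rw [hli']
        have := filterNe_length_lt li m hmmem
        simpa [Ne, decide_not] using this
      have hIH := ih li'.length hlen li' ⟨x, hx', hcx'⟩ rfl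
      obtain ⟨hv1, hv2, hv3⟩ := hIH
      have hvmem : minNotRepeated li' ∈ li := (List.mem_filter.mp hv1).1
      have hvne : minNotRepeated li' ≠ m := by
        have := (List.mem_filter.mp hv1).2
        simpa using this
      refine ⟨hvmem, ?_, ?_⟩
      · rw [← hcnt _ hvne]; exact hv2
      · intro y hy hcy
        have hym : y ≠ m := by intro rfl; omega
        have hcy' : li'.count y = 1 := by rw [hcnt y hym]; exact hcy
        exact hv3 y (List.count_pos_iff.mp (by omega)) hcy'
    · rw [if_neg hc]
      have h1 : li.count m = 1 := by
        have := List.count_pos_iff.mpr hmmem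
        omega
      exact ⟨hmmem, h1, fun y hy _ => hmin' y hy⟩

theorem runScan_isMinUniq (s : List Int) (hs : s.Pairwise (· ≤ ·))
    (hpre : ∃ x ∈ s, s.count x = 1) : IsMinUniq s (runScan s) := by
  induction hn : s.length using Nat.strong_induction_on generalizing s with
  | _ n ih =>
  subst hn
  match s, hs, hpre with
  | [], _, ⟨x, hx, _⟩ => cases hx
  | [x], _, _ =>
    rw [runScan.eq_def]
    show IsMinUniq [x] x
    exact ⟨List.mem_singleton_self x, by simp, fun y hy _ => by
      rw [List.mem_singleton] at hy; omega⟩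
  | x :: y :: rest, hs, hpre =>
    rw [runScan.eq_def]
    show IsMinUniq (x :: y :: rest) (if x = y then runScan ((y :: rest).dropWhile (fun z => z == x)) else x)
    have hxle : ∀ z ∈ y :: rest, x ≤ z := (List.pairwise_cons.mp hs).1
    have hyrp : (y :: rest).Pairwise (· ≤ ·) := (List.pairwise_cons.mp hs).2
    by_cases hxy : x = y
    · rw [if_pos hxy]
      subst hxy
      set s' := (x :: rest).dropWhile (fun z => z == x) with hs'
      -- s' is a sublist of x :: rest
      have hsub : s'.Sublist (x :: rest) := List.dropWhile_sublist _
      have hsub2 : s'.Sublist (x :: x :: rest) := hsub.trans (List.sublist_cons_self _ _)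
      have hps' : s'.Pairwise (· ≤ ·) := hyrp.sublist hsub
      -- every element of s' exceeds x
      have hgt : ∀ z ∈ s', x < z := by
        intro z hz
        rcases hz' : s' with _ | ⟨h0, t0⟩
        · rw [hz'] at hz; cases hz
        · have hh0 : ¬ ((fun z => z == x) h0) := by
            have := List.dropWhile_get_zero_not (p := fun z => z == x) (x :: rest)
              (by rw [← hs', hz']; simp)
            simpa [← hs', hz'] using this
          simp at hh0
          have hh0mem : h0 ∈ x :: rest := hsub.mem (by rw [hz']; exact List.mem_cons_self)
          have hxh0 : x < h0 := lt_of_le_of_ne (hxle h0 hh0mem) (Ne.symm hh0)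
          rw [hz'] at hz
          rcases List.mem_cons.mp hz with rfl | hzt
          · exact hxh0
          · have : h0 ≤ z := by
              have := (List.pairwise_cons.mp (hz' ▸ hps')).1
              exact this z hzt
            omega
      have hxnot : x ∉ s' := fun hmem => absurd (hgt x hmem) (lt_irrefl x)
      -- counts of z ≠ x agree between s and s'
      have hcnt : ∀ z, z ≠ x → (x :: x :: rest).count z = s'.count z := by
        intro z hzx
        have hdecomp : (x :: rest).takeWhile (fun z => z == x) ++ s' = x :: rest :=
          List.takeWhile_append_dropWhile
        have htw : ((x :: rest).takeWhile (fun z => z == x)).count z = 0 := by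
          rw [List.count_eq_zero]
          intro hmem
          exact hzx (by simpa using List.mem_takeWhile_imp hmem)
        calc (x :: x :: rest).count z = (x :: rest).count z := by
              rw [List.count_cons]; simp [Ne.symm hzx]
          _ = ((x :: rest).takeWhile (fun z => z == x) ++ s').count z := by rw [hdecomp]
          _ = s'.count z := by rw [List.count_append, htw]; omega
      -- x is repeated in s
      have hx2 : 2 ≤ (x :: x :: rest).count x := by
        rw [List.count_cons_self, List.count_cons_self]; omega
      -- precondition for s'
      obtain ⟨x0, hx0, hcx0⟩ := hpre
      have hx0x : x0 ≠ x := by intro rfl; omega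
      have hcx0' : s'.count x0 = 1 := by rw [← hcnt x0 hx0x]; exact hcx0
      have hx0' : x0 ∈ s' := List.count_pos_iff.mp (by omega)
      -- length decreases
      have hlen : s'.length < (x :: x :: rest).length := by
        rw [hs']
        have := List.length_dropWhile_le (p := fun z => z == x) (x :: rest)
        simp only [List.length_cons] at this ⊢
        omega
      have hIH := ih s'.length hlen s' hps' ⟨x0, hx0', hcx0'⟩ rfl
      obtain ⟨hv1, hv2, hv3⟩ := hIH
      refine ⟨hsub2.mem hv1, ?_, ?_⟩
      · rw [hcnt _ (fun h => hxnot (h ▸ hv1))]; exact hv2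
      · intro y0 hy0 hcy0
        have hy0x : y0 ≠ x := by
          intro rfl; omega
        have : s'.count y0 = 1 := by rw [← hcnt y0 hy0x]; exact hcy0
        exact hv3 y0 (List.count_pos_iff.mp (by omega)) this
    · rw [if_neg hxy]
      have hxy' : x < y := lt_of_le_of_ne (hxle y List.mem_cons_self) hxy
      have hnot : x ∉ y :: rest := by
        intro hmem
        rcases List.mem_cons.mp hmem with rfl | ht
        · exact hxy rfl
        · have : y ≤ x := (List.pairwise_cons.mp hyrp).1 x ht
          omega
      refine ⟨List.mem_cons_self, ?_, fun y0 hy0 _ => ?_⟩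
      · rw [List.count_cons_self, List.count_eq_zero.mpr hnot]
      · rcases List.mem_cons.mp hy0 with rfl | ht
        · exact le_refl _
        · exact hxle y0 ht

-- ===== VERDICT (by name: the statement is the Claim_ definition above) =====
theorem minNotRepeated_spec : Claim_equal_minNotRepeated := by
  intro li _ hpre
  unfold Spec_minNotRepeated minNotRepeated_alt
  have hperm := PySem.List.sorted_perm li (fun x => x) false
  obtain ⟨x, hx, hc⟩ := hpre
  have hB := runScan_isMinUniq (PySem.List.sorted li (fun x => x))
    (PySem.List.sorted_pairwise li (fun x => x))
    ⟨x, hperm.mem_iff.mpr hx, by rw [hperm.count_eq]; exact hc⟩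
  have hA := minNotRepeated_isMinUniq li ⟨x, hx, hc⟩
  have hB' : IsMinUniq li (runScan (PySem.List.sorted li (fun x => x))) := by
    obtain ⟨h1, h2, h3⟩ := hB
    exact ⟨hperm.mem_iff.mp h1, by rw [← hperm.count_eq]; exact h2,
      fun y hy hcy => h3 y (hperm.mem_iff.mpr hy) (by rw [hperm.count_eq]; exact hcy)⟩
  exact isMinUniq_unique hA hB'
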